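-- pv_equiv track=rewrite | github.com/zita-ch/Homework_in_tsinghua | 大二下辅修信息检索技术/第三次大作业/ini_and_func.py | judge_adaj
-- ===== SOURCE A (Python) =====
-- import itertools
-- from functools import reduce
--
-- def inverted_untuple_descartes(c):
--     ans = []
--     while type(c) != int and type(c) != str:
--         ans.append(c[-1])
--         c = c[0]
--     ans.append(c)
--     return ans
--
-- def strict_desc(numlist):
--     for i in range(len(numlist) - 1):
--         if numlist[i] <= numlist[i + 1]:
--             return 0
--     return 1
--
-- def judge_adaj(positions):
--     n_w = len(positions)
--     flag = 0
--     all_c = reduce(itertools.product, positions)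
--     for c in all_c:
--         temp = inverted_untuple_descartes(c)
--         dis = max(temp) - min(temp)
--         if dis == n_w - 1 and strict_desc(temp):
--             flag = 1
--     return flag
-- ===== SOURCE B (Python) =====
-- def judge_adaj(positions):
--     sets = [set(p) for p in positions[1:]]
--     for base in positions[0]:
--         if all(base + i + 1 in s for i, s in enumerate(sets)):
--             return 1
--     return 0
-- ===== Notes on version B (the rewrite author's own statement) =====
-- stated objective: faster
-- what changed: Instead of materialising the full Cartesian product and testing strict descent and max-min spread of every pick, B builds one hash set per word after the first and, for each base value in the first word, tests membership of base+i in the i-th set.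
import Mathlib
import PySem

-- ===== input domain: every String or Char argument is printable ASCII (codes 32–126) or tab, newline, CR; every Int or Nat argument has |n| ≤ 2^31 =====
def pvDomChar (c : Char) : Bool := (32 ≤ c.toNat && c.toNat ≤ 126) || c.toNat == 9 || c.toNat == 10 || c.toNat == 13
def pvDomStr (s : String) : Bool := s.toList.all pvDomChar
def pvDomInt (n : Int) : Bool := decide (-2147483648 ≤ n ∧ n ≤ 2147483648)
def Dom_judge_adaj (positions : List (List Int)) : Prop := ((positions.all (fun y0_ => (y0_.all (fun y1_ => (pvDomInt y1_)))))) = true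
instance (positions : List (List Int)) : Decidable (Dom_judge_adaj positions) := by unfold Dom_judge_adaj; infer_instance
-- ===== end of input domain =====

-- B avoids materialising the Cartesian product: it builds one set per remaining word
-- and tests membership of base+i for each base value of the first word (objective: faster).

-- ===== PORT A =====
-- Python's nested product tuples ((..(x0,x1)..),xk) are modeled as the pick-list
-- [x0,…,xk]; itertools.product(acc, p) then appends one element to each pick
-- (for c in acc: for y in p: yield c+(y,)).  For n_w = 1 the "tuples" are the bare
-- ints of positions[0], modeled as singleton lists.

-- reduce(itertools.product, positions): foldl of the product step over the tail,
-- seeded with positions[0] (bare values = singleton pick-lists).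
def pvReduceProduct (positions : List (List Int)) : List (List Int) :=
  match positions with
  | [] => []            -- unreachable: reduce() on an empty iterable raises (excluded by Pre_)
  | p :: rest =>
      rest.foldl (fun acc q => acc.flatMap (fun c => q.map (fun y => c ++ [y])))
        (p.map (fun x => [x]))

-- inverted_untuple_descartes: while c is a tuple, append c[-1] and descend into c[0];
-- on the pick-list model: last element is c[-1], the remaining prefix is c[0].
def pvInvertedUntuple (ans : List Int) (c : List Int) : List Int :=
  match c with
  | [] => ans           -- unreachable: picks are nonempty
  | [x] => ans ++ [x]   -- the scalar case: ans.append(c); return ans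
  | x :: y :: t => pvInvertedUntuple (ans ++ [(x :: y :: t).getLastD 0]) (x :: y :: t).dropLast
termination_by c.length
decreasing_by simp [List.length_dropLast]

-- strict_desc: for i in range(len-1): if numlist[i] <= numlist[i+1]: return 0 ; return 1
def pvStrictDescLoop (numlist : List Int) (idxs : List Int) : Int :=
  match idxs with
  | [] => 1
  | i :: rest =>
      if PySem.List.pyGetD numlist i 0 ≤ PySem.List.pyGetD numlist (i + 1) 0 then 0
      else pvStrictDescLoop numlist rest

def pvStrictDesc (numlist : List Int) : Int :=
  pvStrictDescLoop numlist (PySem.List.pyRange 0 ((numlist.length : Int) - 1) 1)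

def judge_adaj (positions : List (List Int)) : Int :=
  let n_w : Int := positions.length
  let all_c := pvReduceProduct positions
  all_c.foldl
    (fun flag c =>
      let temp := pvInvertedUntuple [] c
      let dis := (PySem.List.max? temp (fun x => x)).getD 0 - (PySem.List.min? temp (fun x => x)).getD 0
      if dis = n_w - 1 ∧ pvStrictDesc temp ≠ 0 then 1 else flag)
    0

-- ===== PORT B =====
-- sets = [set(p) for p in positions[1:]]
-- for base in positions[0]: if all(base+i+1 in s for i, s in enumerate(sets)): return 1
-- return 0
def pvAltCheck (base : Int) (sets : List (PySem.Set Int)) : Bool :=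
  (PySem.List.enumerate sets 0).all (fun p => PySem.Set.contains p.2 (base + p.1 + 1))

def pvAltLoop (sets : List (PySem.Set Int)) (bases : List Int) : Int :=
  match bases with
  | [] => 0
  | b :: rest => if pvAltCheck b sets then 1 else pvAltLoop sets rest

def judge_adaj_alt (positions : List (List Int)) : Int :=
  let sets := (positions.drop 1).map (fun p => PySem.Set.ofList p)
  pvAltLoop sets (positions.headD [])

-- ===== PRECONDITION & SPEC =====
-- A raises TypeError on positions = [] (reduce of an empty iterable); B raises IndexError there too.
def Pre_judge_adaj (positions : List (List Int)) : Prop := positions ≠ []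
instance (positions : List (List Int)) : Decidable (Pre_judge_adaj positions) := by
  unfold Pre_judge_adaj; infer_instance

def pvWitness_judge_adaj : List (List Int) := [[1, 5], [2, 9], [3]]

def Spec_judge_adaj (positions : List (List Int)) (out : Int) : Prop := out = judge_adaj_alt positions
instance (positions : List (List Int)) (out : Int) : Decidable (Spec_judge_adaj positions out) := by
  unfold Spec_judge_adaj; infer_instance

-- ===== CLAIM (what is proved, stated in full; the proofs are below) =====
def Claim_equal_judge_adaj : Prop := ∀ (positions : List (List Int)), Dom_judge_adaj positions → Pre_judge_adaj positions → Spec_judge_adaj positions (judge_adaj positions)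

-- ===== LEMMAS AND PROOFS =====

-- The common characterisation both programs are reduced to: some base value of the
-- first word starts a run base, base+1, …, base+n-1 through the remaining words.
def pvGood (p0 : List Int) (rest : List (List Int)) : Prop :=
  ∃ b ∈ p0, ∀ (k : Nat) (h : k < rest.length), b + (k : Int) + 1 ∈ rest[k]

-- ---- B side ----

theorem pvAltCheck_iff (b : Int) (rest : List (List Int)) :
    pvAltCheck b (rest.map (fun p => PySem.Set.ofList p)) = true ↔
      ∀ (k : Nat) (h : k < rest.length), b + (k : Int) + 1 ∈ rest[k] := by
  unfold pvAltCheck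
  rw [List.all_eq_true]
  constructor
  · intro h k hk
    have := h ((k : Int), PySem.Set.ofList rest[k])
      ((PySem.List.mem_enumerate_iff _ _ _).mpr ⟨k, by simpa using hk, by simp⟩)
    simpa [PySem.Set.contains_iff, PySem.Set.mem_ofList] using this
  · intro h p hp
    obtain ⟨k, hk, rfl⟩ := (PySem.List.mem_enumerate_iff _ _ _).mp hp
    have hk' : k < rest.length := by simpa using hk
    simpa [PySem.Set.contains_iff, PySem.Set.mem_ofList] using h k hk'

theorem pvAltLoop_eq_one_iff (sets : List (PySem.Set Int)) (bases : List Int) :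
    pvAltLoop sets bases = 1 ↔ ∃ b ∈ bases, pvAltCheck b sets = true := by
  induction bases with
  | nil => simp [pvAltLoop]
  | cons b rest ih =>
      by_cases h : pvAltCheck b sets = true
      · simp [pvAltLoop, h]
      · simp [pvAltLoop, h, ih]

theorem pvAltLoop_zero_or_one (sets : List (PySem.Set Int)) (bases : List Int) :
    pvAltLoop sets bases = 0 ∨ pvAltLoop sets bases = 1 := by
  induction bases with
  | nil => simp [pvAltLoop]
  | cons b rest ih =>
      by_cases h : pvAltCheck b sets = true
      · simp [pvAltLoop, h]
      · simpa [pvAltLoop, h] using ih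

theorem alt_eq_one_iff (p : List Int) (rest : List (List Int)) :
    judge_adaj_alt (p :: rest) = 1 ↔ pvGood p rest := by
  unfold judge_adaj_alt pvGood
  simp only [List.drop_one, List.tail_cons, List.headD_cons]
  rw [pvAltLoop_eq_one_iff]
  constructor
  · rintro ⟨b, hb, hc⟩
    exact ⟨b, hb, (pvAltCheck_iff b rest).mp hc⟩
  · rintro ⟨b, hb, hc⟩
    exact ⟨b, hb, (pvAltCheck_iff b rest).mpr hc⟩

theorem alt_zero_or_one (p : List Int) (rest : List (List Int)) :
    judge_adaj_alt (p :: rest) = 0 ∨ judge_adaj_alt (p :: rest) = 1 := by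
  unfold judge_adaj_alt
  simpa using pvAltLoop_zero_or_one _ _

-- ---- A side: the flag fold ----

theorem foldl_flag (P : List Int → Prop) [DecidablePred P] :
    ∀ (l : List (List Int)) (flag : Int),
      l.foldl (fun f c => if P c then 1 else f) flag
        = if ∃ c ∈ l, P c then 1 else flag := by
  intro l
  induction l with
  | nil => simp
  | cons c l ih =>
      intro flag
      rw [List.foldl_cons, ih]
      by_cases h : P c <;> by_cases h2 : ∃ x ∈ l, P x <;> simp [h, h2]

-- ---- A side: membership in the Cartesian-product fold ----

theorem mem_prodFold :
    ∀ (l acc : List (List Int)) (c : List Int),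
      (c ∈ l.foldl (fun acc q => acc.flatMap (fun c => q.map (fun y => c ++ [y]))) acc ↔
        ∃ a ∈ acc, ∃ ys, List.Forall₂ (· ∈ ·) ys l ∧ c = a ++ ys) := by
  intro l
  induction l with
  | nil =>
      intro acc c
      simp [List.forall₂_nil_right_iff]
  | cons q l ih =>
      intro acc c
      rw [List.foldl_cons, ih]
      constructor
      · rintro ⟨a', ha', ys, hys, rfl⟩
        rw [List.mem_flatMap] at ha'
        obtain ⟨a, ha, ha'⟩ := ha'
        rw [List.mem_map] at ha'
        obtain ⟨y, hy, rfl⟩ := ha'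
        exact ⟨a, ha, y :: ys, List.Forall₂.cons hy hys, by simp⟩
      · rintro ⟨a, ha, ys, hys, rfl⟩
        cases hys with
        | cons hy hys' =>
            rename_i y ys'
            refine ⟨a ++ [y], ?_, ys', hys', by simp⟩
            rw [List.mem_flatMap]
            exact ⟨a, ha, List.mem_map.mpr ⟨y, hy, rfl⟩⟩

-- ---- A side: inverted_untuple_descartes reverses the pick ----

theorem inverted_eq : ∀ (ans c : List Int), pvInvertedUntuple ans c = ans ++ c.reverse := by
  intro ans c
  induction ans, c using pvInvertedUntuple.induct with
  | case1 ans => simp [pvInvertedUntuple]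
  | case2 ans x => simp [pvInvertedUntuple]
  | case3 ans x y t ih =>
      rw [pvInvertedUntuple, ih]
      have hne : (x :: y :: t) ≠ ([] : List Int) := by simp
      have : (x :: y :: t).dropLast ++ [(x :: y :: t).getLastD 0] = x :: y :: t := by
        rw [List.getLastD_eq_getLast?, List.getLast?_eq_some_getLast hne, Option.getD_some]
        exact List.dropLast_append_getLast hne
      calc (ans ++ [(x :: y :: t).getLastD 0]) ++ (x :: y :: t).dropLast.reverse
          = ans ++ ((x :: y :: t).dropLast ++ [(x :: y :: t).getLastD 0]).reverse := by
            simp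
        _ = ans ++ (x :: y :: t).reverse := by rw [this]

-- ---- A side: strict_desc tests adjacent strict descent ----

theorem sdloop_iff (l : List Int) :
    ∀ (idxs : List Int),
      (pvStrictDescLoop l idxs ≠ 0 ↔
        ∀ i ∈ idxs, ¬ (PySem.List.pyGetD l i 0 ≤ PySem.List.pyGetD l (i + 1) 0)) := by
  intro idxs
  induction idxs with
  | nil => simp [pvStrictDescLoop]
  | cons i rest ih =>
      by_cases h : PySem.List.pyGetD l i 0 ≤ PySem.List.pyGetD l (i + 1) 0
      · simp [pvStrictDescLoop, h]
      · simp only [pvStrictDescLoop, if_neg h, ih, List.mem_cons]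
        constructor
        · intro hr i' hi'
          cases hi' with
          | inl he => rw [he]; exact h
          | inr hm => exact hr i' hm
        · intro hall i' hm
          exact hall i' (Or.inr hm)

theorem strictdesc_iff (l : List Int) :
    pvStrictDesc l ≠ 0 ↔ List.IsChain (· > ·) l := by
  rw [pvStrictDesc, sdloop_iff, List.isChain_iff_getElem]
  constructor
  · intro h i hi
    have hmem : ((i : Int)) ∈ PySem.List.pyRange 0 ((l.length : Int) - 1) 1 :=
      PySem.List.mem_pyRange_one.mpr ⟨by positivity, by omega⟩
    have := h (i : Int) hmem
    rw [PySem.List.pyGetD_of_nonneg l 0 (by positivity),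
        PySem.List.pyGetD_of_nonneg l 0 (by positivity)] at this
    have e1 : ((i : Int)).toNat = i := by omega
    have e2 : ((i : Int) + 1).toNat = i + 1 := by omega
    rw [e1, e2, List.getD_eq_getElem l 0 (by omega), List.getD_eq_getElem l 0 hi] at this
    omega
  · intro h i hmem
    rw [PySem.List.mem_pyRange_one] at hmem
    obtain ⟨h0, h1⟩ := hmem
    have hlt : i.toNat + 1 < l.length := by omega
    have := h i.toNat hlt
    rw [PySem.List.pyGetD_of_nonneg l 0 h0, PySem.List.pyGetD_of_nonneg l 0 (by omega)]
    have e2 : (i + 1).toNat = i.toNat + 1 := by omega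
    rw [e2, List.getD_eq_getElem l 0 (by omega), List.getD_eq_getElem l 0 hlt]
    omega

-- ---- arithmetic of strictly ascending integer lists ----

theorem chain_gap (c : List Int) (hch : List.IsChain (· < ·) c) :
    ∀ (d i : Nat), i + d < c.length →
      c.getD i 0 + (d : Int) ≤ c.getD (i + d) 0 := by
  have step := List.isChain_iff_getElem.mp hch
  intro d
  induction d with
  | zero => intro i h; simp
  | succ d ih =>
      intro i h
      have h1 := ih i (by omega)
      have h2 : c.getD (i + d) 0 + 1 ≤ c.getD (i + d + 1) 0 := by
        rw [List.getD_eq_getElem c 0 (show i + d < c.length by omega),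
            List.getD_eq_getElem c 0 (show i + d + 1 < c.length by omega)]
        have := step (i + d) (by omega)
        omega
      have e : i + (d + 1) = i + d + 1 := by omega
      rw [e]
      push_cast
      omega

theorem consec_of_stats (c : List Int) (hne : c ≠ [])
    (hch : List.IsChain (· < ·) c) (M m : Int)
    (hMmax : ∀ y ∈ c, y ≤ M) (hmmin : ∀ y ∈ c, m ≤ y)
    (hdis : M - m = (c.length : Int) - 1) :
    ∀ (i : Nat), i < c.length → c.getD i 0 = c.getD 0 0 + i := by
  intro i hi
  have hlen : 0 < c.length := List.length_pos_iff.mpr hne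
  have h1 := chain_gap c hch i 0 (by omega)
  simp only [Nat.zero_add] at h1
  have h2 := chain_gap c hch (c.length - 1 - i) i (by omega)
  have e : i + (c.length - 1 - i) = c.length - 1 := by omega
  rw [e] at h2
  have h3 : c.getD (c.length - 1) 0 ≤ M := by
    rw [List.getD_eq_getElem c 0 (by omega)]
    exact hMmax _ (List.getElem_mem _)
  have h4 : m ≤ c.getD 0 0 := by
    rw [List.getD_eq_getElem c 0 (by omega)]
    exact hmmin _ (List.getElem_mem _)
  have e2 : ((c.length - 1 - i : Nat) : Int) = (c.length : Int) - 1 - i := by omega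
  rw [e2] at h2
  omega

-- ---- A reduced to pvGood ----

theorem a_eq_ite (p : List Int) (rest : List (List Int)) :
    judge_adaj (p :: rest) =
      if ∃ c ∈ pvReduceProduct (p :: rest),
          ((PySem.List.max? (pvInvertedUntuple [] c) (fun x => x)).getD 0 -
              (PySem.List.min? (pvInvertedUntuple [] c) (fun x => x)).getD 0 =
            ((p :: rest).length : Int) - 1 ∧ pvStrictDesc (pvInvertedUntuple [] c) ≠ 0)
      then 1 else 0 := by
  unfold judge_adaj
  rw [foldl_flag (P := fun c =>
      ((PySem.List.max? (pvInvertedUntuple [] c) (fun x => x)).getD 0 -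
          (PySem.List.min? (pvInvertedUntuple [] c) (fun x => x)).getD 0 =
        ((p :: rest).length : Int) - 1 ∧ pvStrictDesc (pvInvertedUntuple [] c) ≠ 0))]

theorem pick_shape (p : List Int) (rest : List (List Int)) (c : List Int) :
    c ∈ pvReduceProduct (p :: rest) ↔
      ∃ x ∈ p, ∃ ys, List.Forall₂ (· ∈ ·) ys rest ∧ c = x :: ys := by
  unfold pvReduceProduct
  rw [mem_prodFold]
  constructor
  · rintro ⟨a, ha, ys, hys, rfl⟩
    rw [List.mem_map] at ha
    obtain ⟨x, hx, rfl⟩ := ha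
    exact ⟨x, hx, ys, hys, rfl⟩
  · rintro ⟨x, hx, ys, hys, rfl⟩
    exact ⟨[x], List.mem_map.mpr ⟨x, hx, rfl⟩, ys, hys, rfl⟩

theorem a_cond_iff_good (p : List Int) (rest : List (List Int)) :
    (∃ c ∈ pvReduceProduct (p :: rest),
        ((PySem.List.max? (pvInvertedUntuple [] c) (fun x => x)).getD 0 -
            (PySem.List.min? (pvInvertedUntuple [] c) (fun x => x)).getD 0 =
          ((p :: rest).length : Int) - 1 ∧ pvStrictDesc (pvInvertedUntuple [] c) ≠ 0)) ↔
      pvGood p rest := by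
  constructor
  · rintro ⟨c, hc, hdis, hsd⟩
    obtain ⟨x, hx, ys, hys, rfl⟩ := (pick_shape p rest c).mp hc
    rw [inverted_eq] at hdis hsd
    simp only [List.nil_append] at hdis hsd
    -- strict descent of the reverse = strict ascent of the pick
    have hch : List.IsChain (· < ·) (x :: ys) := by
      have := (strictdesc_iff _).mp hsd
      rw [List.isChain_reverse] at this
      exact this
    -- max / min of the reversed pick
    have hne : (x :: ys).reverse ≠ [] := by simp
    obtain ⟨M, hM⟩ : ∃ M, PySem.List.max? (x :: ys).reverse (fun x => x) = some M := by
      cases h : PySem.List.max? (x :: ys).reverse (fun x => x) with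
      | none => exact absurd ((PySem.List.max?_eq_none_iff _ _).mp h) hne
      | some M => exact ⟨M, rfl⟩
    obtain ⟨m, hm⟩ : ∃ m, PySem.List.min? (x :: ys).reverse (fun x => x) = some m := by
      cases h : PySem.List.min? (x :: ys).reverse (fun x => x) with
      | none => exact absurd ((PySem.List.min?_eq_none_iff _ _).mp h) hne
      | some m => exact ⟨m, rfl⟩
    rw [hM, hm] at hdis
    simp only [Option.getD_some] at hdis
    have hMmax : ∀ y ∈ (x :: ys), y ≤ M := fun y hy =>
      PySem.List.max?_isMax hM y (List.mem_reverse.mpr hy)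
    have hmmin : ∀ y ∈ (x :: ys), m ≤ y := fun y hy =>
      PySem.List.min?_isMin hm y (List.mem_reverse.mpr hy)
    have hyslen : ys.length = rest.length := List.Forall₂.length_eq hys
    have hcons := consec_of_stats (x :: ys) (by simp) hch M m hMmax hmmin
      (by simp only [List.length_cons] at hdis ⊢
          simp only [hyslen] at hdis ⊢
          push_cast at hdis ⊢
          omega)
    refine ⟨x, hx, ?_⟩
    intro k hk
    have hys' := List.forall₂_iff_get.mp hys
    have hlk : k < ys.length := by omega
    have hmem : ys[k] ∈ rest[k] := by
      have := hys'.2 k hlk hk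
      simpa using this
    have hv := hcons (k + 1) (by simp; omega)
    simp only [List.getD_cons_succ, List.getD_cons_zero] at hv
    rw [List.getD_eq_getElem ys 0 hlk] at hv
    push_cast at hv
    have hv' : ys[k] = x + (k : Int) + 1 := by omega
    rwa [hv'] at hmem
  · rintro ⟨b, hb, hrun⟩
    -- the consecutive pick b, b+1, …, b+n-1
    set ys : List Int := List.map (fun k : Nat => ((b + k + 1 : Int))) (List.range rest.length) with hys_def
    have hyslen : ys.length = rest.length := by simp [hys_def]
    have hysget : ∀ (k : Nat), k < ys.length → ys.getD k 0 = b + k + 1 := by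
      intro k hk
      rw [List.getD_eq_getElem ys 0 hk]
      simp [hys_def]
    have hys : List.Forall₂ (· ∈ ·) ys rest := by
      rw [List.forall₂_iff_get]
      refine ⟨by simpa using hyslen, ?_⟩
      intro i h1 h2
      simp only [List.get_eq_getElem]
      have := hysget i h1
      rw [List.getD_eq_getElem ys 0 h1] at this
      rw [this]
      exact hrun i h2
    have hget : ∀ (k : Nat), k < (b :: ys).length → (b :: ys).getD k 0 = b + k := by
      intro k hk
      cases k with
      | zero => simp
      | succ k =>
          simp only [List.getD_cons_succ]
          rw [hysget k (by simpa using hk)]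
          push_cast
          ring
    have hlen : (b :: ys).length = rest.length + 1 := by simp [hyslen]
    have hch : List.IsChain (· < ·) (b :: ys) := by
      rw [List.isChain_iff_getElem]
      intro i hi
      have h1 := hget i (by omega)
      have h2 := hget (i + 1) hi
      rw [List.getD_eq_getElem _ 0 (by omega)] at h1
      rw [List.getD_eq_getElem _ 0 hi] at h2
      rw [h1, h2]
      push_cast
      omega
    refine ⟨b :: ys, (pick_shape p rest _).mpr ⟨b, hb, ys, hys, rfl⟩, ?_, ?_⟩
    · -- the spread is exactly n_w - 1
      rw [inverted_eq]
      simp only [List.nil_append]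
      have hne : (b :: ys).reverse ≠ [] := by simp
      obtain ⟨M, hM⟩ : ∃ M, PySem.List.max? (b :: ys).reverse (fun x => x) = some M := by
        cases h : PySem.List.max? (b :: ys).reverse (fun x => x) with
        | none => exact absurd ((PySem.List.max?_eq_none_iff _ _).mp h) hne
        | some M => exact ⟨M, rfl⟩
      obtain ⟨m, hm⟩ : ∃ m, PySem.List.min? (b :: ys).reverse (fun x => x) = some m := by
        cases h : PySem.List.min? (b :: ys).reverse (fun x => x) with
        | none => exact absurd ((PySem.List.min?_eq_none_iff _ _).mp h) hne
        | some m => exact ⟨m, rfl⟩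
      rw [hM, hm]
      simp only [Option.getD_some]
      have hMmem : M ∈ (b :: ys) := List.mem_reverse.mp (PySem.List.max?_mem hM)
      have hmmem : m ∈ (b :: ys) := List.mem_reverse.mp (PySem.List.min?_mem hm)
      obtain ⟨kM, hkM, hMv⟩ := List.getElem_of_mem hMmem
      obtain ⟨km, hkm, hmv⟩ := List.getElem_of_mem hmmem
      rw [← List.getD_eq_getElem _ 0 hkM, hget kM hkM] at hMv
      rw [← List.getD_eq_getElem _ 0 hkm, hget km hkm] at hmv
      have hMge : b + ((rest.length : Int)) ≤ M := by
        have h1 : (b :: ys).getD rest.length 0 ≤ M := by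
          rw [List.getD_eq_getElem _ 0 (by omega)]
          exact PySem.List.max?_isMax hM _ (List.mem_reverse.mpr (List.getElem_mem _))
        rwa [hget rest.length (by omega)] at h1
      have hmle : m ≤ b := by
        have h1 : m ≤ (b :: ys).getD 0 0 := by
          rw [List.getD_eq_getElem _ 0 (by omega)]
          exact PySem.List.min?_isMin hm _ (List.mem_reverse.mpr (List.getElem_mem _))
        simpa using h1
      simp only [List.length_cons]
      push_cast
      omega
    · -- the reversed pick is strictly descending
      rw [inverted_eq]
      simp only [List.nil_append]
      rw [strictdesc_iff, List.isChain_reverse]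
      exact hch

theorem a_zero_or_one (p : List Int) (rest : List (List Int)) :
    judge_adaj (p :: rest) = 0 ∨ judge_adaj (p :: rest) = 1 := by
  rw [a_eq_ite]
  split <;> simp

theorem a_eq_one_iff (p : List Int) (rest : List (List Int)) :
    judge_adaj (p :: rest) = 1 ↔ pvGood p rest := by
  rw [a_eq_ite, ← a_cond_iff_good p rest]
  split <;> simp_all

-- ===== VERDICT (by name: the statement is the Claim_ definition above) =====
theorem judge_adaj_spec : Claim_equal_judge_adaj := by
  intro positions _ hpre
  unfold Spec_judge_adaj
  match positions with
  | [] => exact absurd rfl hpre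
  | p :: rest =>
      rcases a_zero_or_one p rest with hA | hA <;>
        rcases alt_zero_or_one p rest with hB | hB
      · rw [hA, hB]
      · exact absurd ((a_eq_one_iff p rest).mpr ((alt_eq_one_iff p rest).mp hB)) (by omega)
      · exact absurd ((alt_eq_one_iff p rest).mpr ((a_eq_one_iff p rest).mp hA)) (by omega)
      · rw [hA, hB]
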